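-- pv_equiv track=rewrite | github.com/jJup0/LeetCode | Medium/1424. Diagonal Traverse II.py | findDiagonalOrder_queue
-- ===== SOURCE A (Python) =====
-- from collections import deque
--
-- def findDiagonalOrder_queue(numss: list[list[int]]) -> list[int]:
--     """
--     O(m) / O(n)     time / space complexity
--     """
--     res: list[int] = []
--     dq: deque[tuple[int, int]] = deque([(0, 0)])
--     n = len(numss)
--     while dq:
--         # pop next position in grid from queue
--         i, j = dq.popleft()
--         res.append(numss[i][j])
--
--         # every time first number of a list is reached, append first number of next row to queue
--         next_row_idx = i + 1
--         if j == 0 and next_row_idx < n: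
--             dq.append((next_row_idx, j))
--
--         # if the numbers of the current row have not been exhausted yet append to queue
--         next_col_idx = j + 1
--         if next_col_idx < len(numss[i]):
--             dq.append((i, next_col_idx))
--
--     return res
-- ===== SOURCE B (Python) =====
-- def findDiagonalOrder_queue(numss: list[list[int]]) -> list[int]:
--     # Bucket cells by anti-diagonal d = i + j, then emit each diagonal bottom-left to top-right.
--     nd = max((i + len(row) for i, row in enumerate(numss)), default=0)
--     buckets = [[] for _ in range(nd)]
--     for i, row in enumerate(numss):
--         for j, v in enumerate(row):
--             buckets[i + j].append(v)
--     return [v for b in buckets for v in reversed(b)]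
-- ===== Notes on version B (the rewrite author's own statement) =====
-- stated objective: simpler
-- what changed: Replaces A's BFS deque of (i,j) positions with direct bucketing of values by anti-diagonal d=i+j, then reversing and concatenating the buckets.
import Mathlib
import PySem

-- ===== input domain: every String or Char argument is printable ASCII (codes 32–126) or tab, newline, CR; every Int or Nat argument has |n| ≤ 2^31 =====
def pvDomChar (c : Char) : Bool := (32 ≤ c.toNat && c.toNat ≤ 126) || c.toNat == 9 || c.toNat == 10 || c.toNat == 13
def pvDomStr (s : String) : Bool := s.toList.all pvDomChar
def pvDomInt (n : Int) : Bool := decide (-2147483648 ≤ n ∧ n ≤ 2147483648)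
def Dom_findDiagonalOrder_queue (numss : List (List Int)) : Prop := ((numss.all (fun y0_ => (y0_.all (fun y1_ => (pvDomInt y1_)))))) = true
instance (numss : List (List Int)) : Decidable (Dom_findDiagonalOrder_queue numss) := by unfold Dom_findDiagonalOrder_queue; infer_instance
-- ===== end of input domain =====

-- B replaces A's BFS queue by buckets keyed by the anti-diagonal d = i + j (simpler, no queue bookkeeping).
-- Pre_ excludes exactly the inputs on which A raises IndexError (empty grid / a grid containing an empty row).


-- ===== PORT A =====
-- A's while-loop over the deque; fuel only makes the recursion structural — under Pre_ the
-- loop runs exactly (number of cells) times and the fuel below is proved to be strictly larger.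
def pvALoop (numss : List (List Int)) : Nat → List (Nat × Nat) → List Int → List Int
  | 0, _, res => res
  | _ + 1, [], res => res
  | fuel + 1, (i, j) :: dq, res =>
    match (numss.getD i [])[j]? with
    | none => res        -- Python raises IndexError here: outside Pre_
    | some v =>
      let res2 := res ++ [v]
      let dq2 := if j = 0 ∧ i + 1 < numss.length then dq ++ [(i + 1, j)] else dq
      let dq3 := if j + 1 < (numss.getD i []).length then dq2 ++ [(i, j + 1)] else dq2
      pvALoop numss fuel dq3 res2

def findDiagonalOrder_queue (numss : List (List Int)) : List Int :=
  pvALoop numss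
    ((numss.length + numss.foldl (fun a r => max a r.length) 0) * numss.length + 1)
    [(0, 0)] []

-- ===== PORT B =====
def findDiagonalOrder_queue_alt (numss : List (List Int)) : List Int :=
  let nd := numss.zipIdx.foldl (fun m p => max m (p.2 + p.1.length)) 0
  let buckets := numss.zipIdx.foldl
    (fun bs p => p.1.zipIdx.foldl
      (fun bs2 q => bs2.set (p.2 + q.2) (bs2.getD (p.2 + q.2) [] ++ [q.1])) bs)
    (List.replicate nd ([] : List Int))
  buckets.flatMap List.reverse

-- ===== PRECONDITION & SPEC =====
-- Pre_ excludes exactly the inputs on which A raises IndexError (it reads numss[i][0] for every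
-- row index i, and numss[0][0] first): the empty grid and any grid containing an empty row.
def Pre_findDiagonalOrder_queue (numss : List (List Int)) : Prop :=
  numss ≠ [] ∧ ∀ row ∈ numss, row ≠ []
instance (numss : List (List Int)) : Decidable (Pre_findDiagonalOrder_queue numss) := by
  unfold Pre_findDiagonalOrder_queue; infer_instance
def pvWitness_findDiagonalOrder_queue : List (List Int) := [[1, 2], [3]]

def Spec_findDiagonalOrder_queue (numss : List (List Int)) (out : List Int) : Prop :=
  out = findDiagonalOrder_queue_alt numss
instance (numss : List (List Int)) (out : List Int) : Decidable (Spec_findDiagonalOrder_queue numss out) := by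
  unfold Spec_findDiagonalOrder_queue; infer_instance

-- ===== CLAIM (what is proved, stated in full; the proofs are below) =====
def Claim_equal_findDiagonalOrder_queue : Prop :=
  ∀ (numss : List (List Int)), Dom_findDiagonalOrder_queue numss →
    Pre_findDiagonalOrder_queue numss →
    Spec_findDiagonalOrder_queue numss (findDiagonalOrder_queue numss)

-- ===== LEMMAS AND PROOFS =====

-- length of row i (rows past the end count as empty)
def pvL (numss : List (List Int)) (i : Nat) : Nat := (numss.getD i []).length
-- value at a cell
def pvVal (numss : List (List Int)) (c : Nat × Nat) : Int := (numss.getD c.1 []).getD c.2 0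
-- number of anti-diagonals (= B's `nd`)
def pvND (numss : List (List Int)) : Nat :=
  numss.zipIdx.foldl (fun m p => max m (p.2 + p.1.length)) 0
-- the cells of anti-diagonal d, rows ascending
def pvAsc (numss : List (List Int)) (d : Nat) : List (Nat × Nat) :=
  (List.range numss.length).filterMap
    (fun i => if i ≤ d ∧ d - i < pvL numss i then some (i, d - i) else none)
-- the same diagonal in A's pop order (rows descending)
def pvDiag (numss : List (List Int)) (d : Nat) : List (Nat × Nat) := (pvAsc numss d).reverse
-- the cells A enqueues while popping cell c
def pvChildren (numss : List (List Int)) (c : Nat × Nat) : List (Nat × Nat) :=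
  (if c.2 = 0 ∧ c.1 + 1 < numss.length then [(c.1 + 1, c.2)] else []) ++
  (if c.2 + 1 < (numss.getD c.1 []).length then [(c.1, c.2 + 1)] else [])
-- the common value of both programs: diagonals in order, each bottom-left to top-right
def pvOut (numss : List (List Int)) : List Int :=
  (List.range (pvND numss)).flatMap (fun d => ((pvAsc numss d).map (pvVal numss)).reverse)
-- one bucket-update step of B
def pvStep (bs : List (List Int)) (p : Nat × Int) : List (List Int) :=
  bs.set p.1 (bs.getD p.1 [] ++ [p.2])
-- all cells of the grid as (diagonal, value) pairs, row-major
def pvCells (numss : List (List Int)) : List (Nat × Int) :=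
  numss.zipIdx.flatMap (fun p => p.1.zipIdx.map (fun q => (p.2 + q.2, q.1)))

lemma pv_init_le_foldl_max {γ : Type} (f : γ → Nat) :
    ∀ (l : List γ) (a : Nat), a ≤ l.foldl (fun m x => max m (f x)) a := by
  intro l
  induction l with
  | nil => simp
  | cons y t ih =>
    intro a
    exact le_trans (Nat.le_max_left a (f y)) (ih (max a (f y)))

lemma pv_le_foldl_max {γ : Type} (f : γ → Nat) :
    ∀ (l : List γ) (a : Nat) (x : γ), x ∈ l → f x ≤ l.foldl (fun m x => max m (f x)) a := by
  intro l
  induction l with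
  | nil => simp
  | cons y t ih =>
    intro a x hx
    rcases List.mem_cons.1 hx with h | h
    · subst h
      exact le_trans (Nat.le_max_right a (f x)) (pv_init_le_foldl_max f t _)
    · exact ih _ x h

lemma pv_foldl_max_le {γ : Type} (f : γ → Nat) (c : Nat) :
    ∀ (l : List γ) (a : Nat), a ≤ c → (∀ x ∈ l, f x ≤ c) →
      l.foldl (fun m x => max m (f x)) a ≤ c := by
  intro l
  induction l with
  | nil => simpa using fun a h _ => h
  | cons y t ih =>
    intro a ha hall
    exact ih _ (max_le ha (hall y (List.mem_cons_self))) fun x hx => hall x (List.mem_cons_of_mem _ hx)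

lemma pv_getD_eq {α : Type} (l : List α) (i : Nat) (dflt : α) (h : i < l.length) :
    l.getD i dflt = l[i] := by
  simp [List.getD_eq_getElem?_getD, List.getElem?_eq_getElem h]

lemma pv_ND_ge (numss : List (List Int)) (i : Nat) (h : i < numss.length) :
    i + pvL numss i ≤ pvND numss := by
  have hmem : (numss.getD i [], i) ∈ numss.zipIdx := by
    rw [pv_getD_eq _ _ _ h]
    have hlen : i < numss.zipIdx.length := by simpa using h
    have h2 := List.getElem_mem hlen
    simpa [List.getElem_zipIdx] using h2
  have h3 := pv_le_foldl_max (fun p : List Int × Nat => p.2 + p.1.length) numss.zipIdx 0 _ hmem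
  simpa [pvND, pvL] using h3

lemma pv_ND_le (numss : List (List Int)) :
    pvND numss ≤ numss.length + numss.foldl (fun a r => max a r.length) 0 := by
  refine pv_foldl_max_le _ _ _ _ (Nat.zero_le _) ?_
  rintro ⟨row, i⟩ hmem
  obtain ⟨-, hi, hrow⟩ := List.mem_zipIdx hmem
  simp only [Nat.zero_add] at hi
  have h1 : row.length ≤ numss.foldl (fun a r => max a r.length) 0 := by
    apply pv_le_foldl_max List.length numss 0
    rw [hrow]
    exact List.getElem_mem _
  show i + row.length ≤ _
  omega

lemma pv_asc_empty (numss : List (List Int)) (d : Nat) (h : pvND numss ≤ d) :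
    pvAsc numss d = [] := by
  apply List.filterMap_eq_nil_iff.2
  intro i hi
  have hi' : i < numss.length := List.mem_range.1 hi
  have := pv_ND_ge numss i hi'
  split_ifs with hc
  · omega
  · rfl

lemma pv_asc_valid (numss : List (List Int)) (d : Nat) (c : Nat × Nat) (h : c ∈ pvAsc numss d) :
    c.1 < numss.length ∧ c.2 < pvL numss c.1 := by
  obtain ⟨i, hi, hf⟩ := List.mem_filterMap.1 h
  split_ifs at hf with hc
  cases hf
  exact ⟨List.mem_range.1 hi, hc.2⟩

-- one iteration of A's loop on a valid cell
lemma pv_step_A (numss : List (List Int)) (i j : Nat) (dq : List (Nat × Nat)) (res : List Int)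
    (v : Int) (hv : (numss.getD i [])[j]? = some v) (fuel : Nat) :
    pvALoop numss (fuel + 1) ((i, j) :: dq) res
      = pvALoop numss fuel (dq ++ pvChildren numss (i, j)) (res ++ [v]) := by
  simp only [pvALoop, hv, pvChildren]
  split_ifs <;> simp

lemma pv_ALoop_nil (numss : List (List Int)) (fuel : Nat) (res : List Int) :
    pvALoop numss fuel [] res = res := by
  cases fuel <;> simp [pvALoop]

-- scanning a block of valid cells: each is popped, its value emitted, its children appended
lemma pv_scan (numss : List (List Int)) :
    ∀ (cells : List (Nat × Nat)), (∀ c ∈ cells, c.2 < pvL numss c.1) →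
      ∀ (E : List (Nat × Nat)) (res : List Int) (fuel : Nat),
        pvALoop numss (cells.length + fuel) (cells ++ E) res
          = pvALoop numss fuel (E ++ cells.flatMap (pvChildren numss))
              (res ++ cells.map (pvVal numss)) := by
  intro cells
  induction cells with
  | nil => intro _ E res fuel; simp
  | cons c t ih =>
    rintro hval E res fuel
    obtain ⟨i, j⟩ := c
    have hj : j < (numss.getD i []).length := hval (i, j) List.mem_cons_self
    have hv : (numss.getD i [])[j]? = some ((numss.getD i []).getD j 0) := by
      rw [List.getElem?_eq_getElem hj, pv_getD_eq _ _ _ hj]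
    show pvALoop numss (t.length + 1 + fuel) ((i, j) :: (t ++ E)) res = _
    have : t.length + 1 + fuel = (t.length + fuel) + 1 := by omega
    rw [this, pv_step_A numss i j (t ++ E) res _ hv (t.length + fuel)]
    rw [List.append_assoc, ih (fun c hc => hval c (List.mem_cons_of_mem _ hc)) (E ++ pvChildren numss (i, j)) (res ++ [(numss.getD i []).getD j 0]) fuel]
    simp [pvVal, List.flatMap_cons, List.append_assoc]

-- inserting one extra element after block k of a concatenation of blocks
lemma pv_insert {α : Type} (k m : Nat) (A : Nat → List α) (x : α) :
    (List.range ((k + 1) + m)).flatMap (fun i => A i ++ if i = k then [x] else [])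
      = (List.range (k + 1)).flatMap A ++ [x]
          ++ ((List.range m).map ((k + 1) + ·)).flatMap A := by
  rw [List.range_add, List.flatMap_append]
  congr 1
  · rw [List.range_succ, List.flatMap_append, List.flatMap_append]
    have h1 : (List.range k).flatMap (fun i => A i ++ if i = k then [x] else [])
        = (List.range k).flatMap A := by
      apply List.flatMap_congr
      intro i hi
      have := List.mem_range.1 hi
      rw [if_neg (by omega), List.append_nil]
    rw [h1]
    simp [List.append_assoc]
  · apply List.flatMap_congr
    intro i hi
    obtain ⟨j, -, rfl⟩ := List.mem_map.1 hi
    rw [if_neg (by omega), List.append_nil]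

-- moving the extra element from after block d to after block d+1 when block d+1 is empty
lemma pv_shift {α : Type} (n d : Nat) (A : Nat → List α) (x : α) (hA : A (d + 1) = []) :
    (List.range n).flatMap (fun i => A i ++ (if i = d ∧ d + 1 < n then [x] else []))
      = (List.range n).flatMap (fun i => A i ++ (if i = d + 1 then [x] else [])) := by
  by_cases hn : d + 1 < n
  · have h1 : (List.range n).flatMap (fun i => A i ++ (if i = d ∧ d + 1 < n then [x] else []))
        = (List.range n).flatMap (fun i => A i ++ (if i = d then [x] else [])) := by
      apply List.flatMap_congr
      intro i _
      congr 1
      simp [hn]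
    rw [h1]
    obtain ⟨m, rfl⟩ : ∃ m, n = (d + 2) + m := ⟨n - (d + 2), by omega⟩
    rw [show (d + 2) + m = (d + 1) + (m + 1) from by omega, pv_insert d (m + 1) A x,
        show (d + 1) + (m + 1) = ((d + 1) + 1) + m from by omega, pv_insert (d + 1) m A x]
    rw [show (d + 1) + 1 = d + 2 from rfl, List.range_succ (n := d + 1),
        List.flatMap_append, List.range_succ_eq_map (n := m)]
    have hmap : ((0 :: (List.range m).map Nat.succ).map ((d + 1) + ·)).flatMap A
        = A (d + 1) ++ ((List.range m).map ((d + 2) + ·)).flatMap A := by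
      rw [List.map_cons, List.flatMap_cons, List.map_map]
      have : ((d + 1) + ·) ∘ Nat.succ = ((d + 2) + ·) := by
        funext y
        simp [Function.comp]
        omega
      rw [this]
    rw [hmap]
    simp [hA, List.append_assoc]
  · apply List.flatMap_congr
    intro i hi
    have := List.mem_range.1 hi
    rw [if_neg (by omega), if_neg (by omega)]

-- the children generated while popping diagonal d (descending) are exactly diagonal d+1 (descending)
lemma pv_children_diag (numss : List (List Int))
    (hPre : ∀ row ∈ numss, row ≠ []) (d : Nat) :
    (pvDiag numss d).flatMap (pvChildren numss) = pvDiag numss (d + 1) := by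
  have hL0 : ∀ i, i < numss.length → 0 < pvL numss i := by
    intro i hi
    have hg : numss.getD i [] = numss[i] := pv_getD_eq _ _ _ hi
    rw [pvL, hg]
    exact List.length_pos_iff.2 (hPre _ (List.getElem_mem hi))
  rw [pvDiag, pvDiag, List.flatMap_reverse]
  congr 1
  rw [pvAsc, pvAsc, List.filterMap_eq_flatMap_toList, List.filterMap_eq_flatMap_toList,
    List.flatMap_assoc]
  have key : ∀ i ∈ List.range numss.length,
      (if i ≤ d ∧ d - i < pvL numss i then some ((i, d - i) : Nat × Nat) else none).toList.flatMap
          (List.reverse ∘ pvChildren numss)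
        = (fun i => (if i ≤ d ∧ d + 1 - i < pvL numss i then some ((i, d + 1 - i) : Nat × Nat) else none).toList) i
            ++ (if i = d ∧ d + 1 < numss.length then [((d + 1 : Nat), (0 : Nat))] else []) := by
    intro i hi
    beta_reduce
    have hi' : i < numss.length := List.mem_range.1 hi
    have hLi := hL0 i hi'
    by_cases hp : i ≤ d ∧ d - i < pvL numss i
    · rw [if_pos hp]
      simp only [Option.toList_some, List.flatMap_cons, List.flatMap_nil, List.append_nil,
        Function.comp_apply]
      rw [pvChildren, List.reverse_append]
      simp only [pvL] at *
      split_ifs with h1 h2 h3 h4 h5 <;>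
        first
          | (exfalso; omega)
          | rfl
          | (simp only [Option.toList_some, Option.toList_none, List.reverse_cons,
              List.reverse_nil, List.nil_append, List.append_nil, List.cons_append,
              List.singleton_append, List.cons.injEq, Prod.mk.injEq, List.nil_eq,
              and_true, true_and]
             omega)
          | (simp only [Option.toList_some, Option.toList_none, List.reverse_cons,
              List.reverse_nil, List.nil_append, List.append_nil, List.cons_append,
              List.singleton_append, List.cons.injEq, Prod.mk.injEq, List.nil_eq,
              and_true, true_and])
    · rw [if_neg hp]
      have hA : ¬(i ≤ d ∧ d + 1 - i < pvL numss i) := by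
        intro hc
        exact hp ⟨hc.1, by omega⟩
      have hB : ¬(i = d ∧ d + 1 < numss.length) := by
        rintro ⟨rfl, -⟩
        exact hp ⟨le_refl _, by omega⟩
      rw [if_neg hA, if_neg hB]
      rfl
  have key2 : ∀ i ∈ List.range numss.length,
      (if i ≤ d + 1 ∧ d + 1 - i < pvL numss i then some ((i, d + 1 - i) : Nat × Nat) else none).toList
        = (fun i => (if i ≤ d ∧ d + 1 - i < pvL numss i then some ((i, d + 1 - i) : Nat × Nat) else none).toList) i
            ++ (if i = d + 1 then [((d + 1 : Nat), (0 : Nat))] else []) := by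
    intro i hi
    beta_reduce
    have hi' : i < numss.length := List.mem_range.1 hi
    have hLi := hL0 i hi'
    split_ifs with h1 h2 h3 <;>
      first
        | (exfalso; omega)
        | rfl
        | (simp only [Option.toList_some, Option.toList_none, List.nil_append, List.append_nil,
            List.singleton_append, List.cons.injEq, Prod.mk.injEq, List.nil_eq, and_true, true_and]
           omega)
        | (simp only [Option.toList_some, Option.toList_none, List.nil_append, List.append_nil,
            List.singleton_append, List.cons.injEq, Prod.mk.injEq, List.nil_eq, and_true, true_and])
  rw [List.flatMap_congr key, List.flatMap_congr key2]
  exact pv_shift numss.length d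
    (fun i => (if i ≤ d ∧ d + 1 - i < pvL numss i then some ((i, d + 1 - i) : Nat × Nat) else none).toList)
    ((d + 1 : Nat), (0 : Nat))
    (by beta_reduce; rw [if_neg (by omega)]; rfl)

-- running A's loop from diagonal d flushes the remaining diagonals in order
lemma pv_run (numss : List (List Int)) (hPre : ∀ row ∈ numss, row ≠ []) :
    ∀ (k : Nat) (d : Nat) (res : List Int) (fuel : Nat),
      pvND numss ≤ d + k → k * numss.length < fuel →
      pvALoop numss fuel (pvDiag numss d) res
        = res ++ (List.range' d k).flatMap (fun t => ((pvAsc numss t).map (pvVal numss)).reverse) := by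
  intro k
  induction k with
  | zero =>
    intro d res fuel hnd _
    have : pvDiag numss d = [] := by simp [pvDiag, pv_asc_empty numss d (by omega)]
    simp [this, pv_ALoop_nil]
  | succ k ih =>
    intro d res fuel hnd hfuel
    rw [Nat.succ_mul] at hfuel
    have hlen : (pvDiag numss d).length ≤ numss.length := by
      simpa [pvDiag, pvAsc] using
        le_trans (List.length_filterMap_le _ _) (le_of_eq (List.length_range))
    have h1 : pvALoop numss fuel (pvDiag numss d) res
        = pvALoop numss ((pvDiag numss d).length + (fuel - (pvDiag numss d).length))
            (pvDiag numss d ++ []) res := by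
      rw [List.append_nil]
      congr 1
      omega
    rw [h1, pv_scan numss (pvDiag numss d)
          (fun c hc => (pv_asc_valid numss d c (List.mem_reverse.1 hc)).2) [] res _]
    rw [List.nil_append, pv_children_diag numss hPre d,
        ih (d + 1) _ _ (by omega) (by omega)]
    have hmap : (pvDiag numss d).map (pvVal numss) = ((pvAsc numss d).map (pvVal numss)).reverse := by
      simp [pvDiag]
    rw [hmap, List.range'_succ, List.flatMap_cons, List.append_assoc]

lemma pv_diag_zero (numss : List (List Int)) (h0 : numss ≠ [])
    (hPre : ∀ row ∈ numss, row ≠ []) : pvDiag numss 0 = [(0, 0)] := by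
  have hn : 0 < numss.length := List.length_pos_iff.2 h0
  have hL0 : 0 < pvL numss 0 := by
    have : numss.getD 0 [] = numss[0] := pv_getD_eq _ _ _ hn
    have hne := hPre numss[0] (List.getElem_mem hn)
    simp only [pvL, this]
    exact List.length_pos_iff.2 hne
  have hsplit : numss.length = 1 + (numss.length - 1) := by omega
  simp only [pvDiag, pvAsc]
  rw [hsplit, List.range_add, List.filterMap_append, List.filterMap_map]
  have h1 : (List.range 1).filterMap
      (fun i => if i ≤ 0 ∧ 0 - i < pvL numss i then some (i, 0 - i) else none) = [(0, 0)] := by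
    simp [List.range_succ, hL0]
  have h2 : (List.range (numss.length - 1)).filterMap
      ((fun i => if i ≤ 0 ∧ 0 - i < pvL numss i then some (i, 0 - i) else none) ∘ (1 + ·)) = [] := by
    apply List.filterMap_eq_nil_iff.2
    intro a _
    simp [Function.comp]
  rw [h1, h2]
  simp

-- flatMap over a longer range adds only empty diagonals
lemma pv_flat_trunc (numss : List (List Int)) (k : Nat) (h : pvND numss ≤ k) :
    (List.range k).flatMap (fun d => ((pvAsc numss d).map (pvVal numss)).reverse) = pvOut numss := by
  have hk : k = pvND numss + (k - pvND numss) := by omega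
  rw [pvOut, hk, List.range_add, List.flatMap_append]
  have : ((List.range (k - pvND numss)).map (pvND numss + ·)).flatMap
      (fun d => ((pvAsc numss d).map (pvVal numss)).reverse) = [] := by
    rw [List.flatMap_eq_nil_iff]
    intro x hx
    obtain ⟨m, _, rfl⟩ := List.mem_map.1 hx
    rw [pv_asc_empty numss _ (by omega)]
    rfl
  rw [this, List.append_nil]

lemma pv_A_eq (numss : List (List Int)) (hPre : Pre_findDiagonalOrder_queue numss) :
    findDiagonalOrder_queue numss = pvOut numss := by
  obtain ⟨h0, hrows⟩ := hPre
  rw [findDiagonalOrder_queue, show [((0 : Nat), (0 : Nat))] = pvDiag numss 0 from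
    (pv_diag_zero numss h0 hrows).symm]
  rw [pv_run numss hrows (numss.length + numss.foldl (fun a r => max a r.length) 0) 0 [] _
      (by simpa using pv_ND_le numss) (by omega)]
  rw [List.nil_append, ← List.range_eq_range',
    pv_flat_trunc numss _ (pv_ND_le numss)]

-- ==== B side ====

lemma pv_getD_set_list (l : List (List Int)) (k d : Nat) (v : List Int) :
    (l.set k v).getD d [] = if k = d ∧ k < l.length then v else l.getD d [] := by
  simp only [List.getD_eq_getElem?_getD, List.getElem?_set]
  split_ifs <;> simp_all <;> omega

lemma pv_fold_step_len : ∀ (ps : List (Nat × Int)) (bs : List (List Int)),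
    (ps.foldl pvStep bs).length = bs.length := by
  intro ps
  induction ps with
  | nil => intro bs; rfl
  | cons p t ih => intro bs; rw [List.foldl_cons, ih]; simp [pvStep]

lemma pv_fold_step_getD : ∀ (ps : List (Nat × Int)) (bs : List (List Int)),
    (∀ p ∈ ps, p.1 < bs.length) → ∀ d,
      (ps.foldl pvStep bs).getD d [] = bs.getD d [] ++ (ps.filter (fun p => p.1 = d)).map (·.2) := by
  intro ps
  induction ps with
  | nil => intro bs _ d; simp
  | cons p t ih =>
    rintro bs hkeys d
    obtain ⟨k, v⟩ := p
    have hk : k < bs.length := hkeys (k, v) List.mem_cons_self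
    rw [List.foldl_cons]
    rw [ih (pvStep bs (k, v)) (by
        intro q hq
        have := hkeys q (List.mem_cons_of_mem _ hq)
        simpa [pvStep] using this) d]
    simp only [pvStep] at *
    rw [pv_getD_set_list bs k d _]
    by_cases hkd : k = d
    · subst hkd
      simp [hk, List.filter_cons]
    · simp [hkd, List.filter_cons]

-- per-row: the cells of row i that land on diagonal d
lemma pv_rowFilter (i d : Nat) :
    ∀ (row : List Int) (s : Nat),
      ((row.zipIdx s).map (fun q => (i + q.2, q.1))).filter (fun p => p.1 = d)
        = if i + s ≤ d ∧ d < i + s + row.length then [(d, row.getD (d - i - s) 0)] else [] := by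
  intro row
  induction row with
  | nil =>
    intro s
    simp only [List.zipIdx_nil, List.map_nil, List.filter_nil, List.length_nil]
    rw [if_neg (by omega)]
  | cons x t ih =>
    intro s
    simp only [List.zipIdx_cons, List.map_cons, List.filter_cons, ih (s + 1),
      decide_eq_true_eq, List.length_cons]
    split_ifs with h1 h2 h3 <;>
      first
        | rfl
        | (exfalso; omega)
        | (rw [show d - i - s = 0 from by omega]; simp [h1])
        | (rw [show d - i - s = (d - i - (s + 1)) + 1 from by omega, List.getD_cons_succ])

-- zipIdx-indexed flatMap as a range-indexed flatMap
lemma pv_zipIdx_flatMap {β : Type} :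
    ∀ (l : List (List Int)) (f : Nat → List Int → List β),
      l.zipIdx.flatMap (fun p => f p.2 p.1)
        = (List.range l.length).flatMap (fun i => f i (l.getD i [])) := by
  intro l
  induction l with
  | nil => intro f; simp
  | cons x t ih =>
    intro f
    rw [List.zipIdx_cons, List.flatMap_cons]
    have hsh : t.zipIdx 1 = (t.zipIdx 0).map (fun p => (p.1, p.2 + 1)) := List.zipIdx_succ
    rw [hsh, List.flatMap_map]
    have := ih (fun i r => f (i + 1) r)
    simp only [] at this
    rw [show (fun p : List Int × Nat => f (p.2 + 1) p.1) = (fun p : List Int × Nat => (fun i r => f (i+1) r) p.2 p.1) from rfl, this]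
    rw [List.length_cons, List.range_succ_eq_map, List.flatMap_cons, List.flatMap_map]
    simp [Nat.succ_eq_add_one]

lemma pv_cells_keys (numss : List (List Int)) (p : Nat × Int) (h : p ∈ pvCells numss) :
    p.1 < pvND numss := by
  obtain ⟨⟨row, i⟩, hmem, hp⟩ := List.mem_flatMap.1 h
  obtain ⟨-, hi, hrow⟩ := List.mem_zipIdx hmem
  simp only [Nat.zero_add] at hi
  obtain ⟨⟨v, j⟩, hq, rfl⟩ := List.mem_map.1 hp
  obtain ⟨-, hj, -⟩ := List.mem_zipIdx hq
  simp only [Nat.zero_add] at hj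
  have hnd := pv_ND_ge numss i hi
  simp only [Nat.sub_zero] at hrow
  have hLi : pvL numss i = row.length := by
    rw [pvL, pv_getD_eq _ _ _ hi, hrow]
  show i + j < pvND numss
  omega

-- the bucket of diagonal d holds its values in row-ascending order
lemma pv_bucket (numss : List (List Int)) (d : Nat) :
    ((pvCells numss).filter (fun p => p.1 = d)).map (·.2)
      = (pvAsc numss d).map (pvVal numss) := by
  rw [pvCells, List.filter_flatMap, List.map_flatMap]
  have hrow : ∀ (i : Nat) (row : List Int),
      (((row.zipIdx.map (fun q => (i + q.2, q.1))).filter (fun p => p.1 = d)).map (·.2))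
        = if i ≤ d ∧ d < i + row.length then [row.getD (d - i) 0] else [] := by
    intro i row
    rw [pv_rowFilter i d row 0]
    split_ifs with h1 h2 h2 <;> simp_all <;> omega
  calc numss.zipIdx.flatMap
        (fun p => (((p.1.zipIdx.map (fun q => (p.2 + q.2, q.1))).filter (fun q => q.1 = d)).map (·.2)))
      = numss.zipIdx.flatMap (fun p => if p.2 ≤ d ∧ d < p.2 + p.1.length then [p.1.getD (d - p.2) 0] else []) := by
        apply List.flatMap_congr
        intro p _
        exact hrow p.2 p.1
    _ = (List.range numss.length).flatMap
          (fun i => if i ≤ d ∧ d < i + (numss.getD i []).length then [(numss.getD i []).getD (d - i) 0] else []) := by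
        exact pv_zipIdx_flatMap numss (fun i r => if i ≤ d ∧ d < i + r.length then [r.getD (d - i) 0] else [])
    _ = (pvAsc numss d).map (pvVal numss) := by
        rw [pvAsc, List.map_filterMap]
        rw [List.filterMap_eq_flatMap_toList]
        apply List.flatMap_congr
        intro i hi
        have hi' : i < numss.length := List.mem_range.1 hi
        simp only [pvL]
        split_ifs with h1 h2 h2 <;>
          · simp [pvVal, pv_getD_eq _ _ _ hi']
            try omega

lemma pv_B_eq (numss : List (List Int)) :
    findDiagonalOrder_queue_alt numss = pvOut numss := by
  rw [findDiagonalOrder_queue_alt]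
  have hfold : numss.zipIdx.foldl
      (fun bs p => p.1.zipIdx.foldl
        (fun bs2 q => bs2.set (p.2 + q.2) (bs2.getD (p.2 + q.2) [] ++ [q.1])) bs)
      (List.replicate (pvND numss) ([] : List Int))
      = (pvCells numss).foldl pvStep (List.replicate (pvND numss) ([] : List Int)) := by
    have hfn : (fun (bs : List (List Int)) (p : List Int × Nat) => p.1.zipIdx.foldl
        (fun bs2 q => bs2.set (p.2 + q.2) (bs2.getD (p.2 + q.2) [] ++ [q.1])) bs)
        = fun bs p => (p.1.zipIdx.map (fun q => ((p.2 + q.2 : Nat), q.1))).foldl pvStep bs := by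
      funext bs p
      rw [List.foldl_map]
      rfl
    rw [pvCells, List.foldl_flatMap, hfn]
  show (numss.zipIdx.foldl _ (List.replicate (pvND numss) ([] : List Int))).flatMap List.reverse = _
  rw [hfold]
  set buckets := (pvCells numss).foldl pvStep (List.replicate (pvND numss) ([] : List Int)) with hb
  have hlen : buckets.length = pvND numss := by
    rw [hb, pv_fold_step_len]; simp
  have hget : ∀ d, buckets.getD d [] = (pvAsc numss d).map (pvVal numss) := by
    intro d
    rw [hb, pv_fold_step_getD (pvCells numss) _ (by
      intro p hp
      have := pv_cells_keys numss p hp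
      simpa using this) d]
    rw [pv_bucket]
    have hrep : (List.replicate (pvND numss) ([] : List Int)).getD d [] = [] := by
      simp [List.getD_eq_getElem?_getD, List.getElem?_replicate]
      split_ifs <;> rfl
    rw [hrep, List.nil_append]
  have hbuckets : buckets = (List.range (pvND numss)).map (fun d => (pvAsc numss d).map (pvVal numss)) := by
    apply List.ext_getElem
    · simp [hlen]
    · intro d hd hd2
      have hdlt : d < pvND numss := by simpa [hlen] using hd
      have : buckets[d] = buckets.getD d [] := by
        rw [List.getD_eq_getElem?_getD, List.getElem?_eq_getElem hd]
        rfl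
      rw [this, hget d]
      simp
  rw [hbuckets, List.flatMap_map, pvOut]

-- ===== VERDICT (by name: the statement is the Claim_ definition above) =====
theorem findDiagonalOrder_queue_spec : Claim_equal_findDiagonalOrder_queue := by
  intro numss _ hpre
  unfold Spec_findDiagonalOrder_queue
  rw [pv_A_eq numss hpre, pv_B_eq numss]
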